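-- pv_equiv track=rewrite | github.com/august-hw2/25_Programmers_Python | 프로그래머스/0/181881. 조건에 맞게 수열 변환하기 2/조건에 맞게 수열 변환하기 2.py | solution
-- ===== SOURCE A (Python) =====
-- def solution(arr):
--     res = 0
--     old = arr
--     while True:
--         new = []
--         for i in old:
--             if i>50 and i%2 == 0:
--                 i //= 2
--             elif i<50 and i%2:
--                 i = 2*i+1
--             new.append(i)
--         if new == old:
--             break
--         else:
--             old = new
--             res += 1
--     return res
-- ===== SOURCE B (Python) =====
-- def solution(arr):
--     best = 0
--     for x in arr:
--         if x > 50 and x % 2 == 0: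
--             v, c = x, 0
--             while v > 50 and v % 2 == 0:
--                 v //= 2
--                 c += 1
--             if v < 50 and v % 2:
--                 c += 1
--         elif x % 2 and 1 <= x < 50:
--             v, c = x, 0
--             while v < 50:
--                 v = 2 * v + 1
--                 c += 1
--         else:
--             c = 0
--         best = max(best, c)
--     return best
-- ===== Notes on version B (the rewrite author's own statement) =====
-- stated objective: alternative
-- what changed: Replaces A's synchronized whole-list rounds (rebuild the list each round until it stops changing) with a per-element case analysis: even elements >50 run only the halving loop plus an arithmetic +1 correction, odd elements in 1..49 run only the doubling loop, everything else contributes 0, and the answer is the running maximum.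
import Mathlib
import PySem

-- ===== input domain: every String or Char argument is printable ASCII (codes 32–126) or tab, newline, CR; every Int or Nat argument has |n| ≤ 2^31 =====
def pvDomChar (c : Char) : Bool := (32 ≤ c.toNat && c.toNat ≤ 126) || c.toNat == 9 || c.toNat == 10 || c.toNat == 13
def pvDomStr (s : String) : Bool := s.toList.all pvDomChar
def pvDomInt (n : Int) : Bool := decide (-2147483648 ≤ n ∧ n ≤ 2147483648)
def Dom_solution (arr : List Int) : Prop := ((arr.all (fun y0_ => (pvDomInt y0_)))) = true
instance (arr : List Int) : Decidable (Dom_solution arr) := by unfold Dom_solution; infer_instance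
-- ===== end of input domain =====

-- B replaces A's synchronized whole-list rounds by a per-element case analysis (halving
-- phase for even >50 with an arithmetic +1 correction, doubling phase for odd 1..49,
-- 0 otherwise), keeping the maximum count; equal return values are proved on Pre_.

-- ===== PORT A =====
-- A's transformation rule for one element (the if/elif body of A's inner for-loop).
def pvStepA (i : Int) : Int :=
  if i > 50 ∧ i % 2 = 0 then PySem.Int.floordiv i 2
  else if i < 50 ∧ i % 2 ≠ 0 then 2 * i + 1
  else i

-- A's 'while True' loop; the fuel argument only makes the recursion total (inside
-- Pre_ ∧ Dom the list stabilizes in well under 100 rounds, so fuel 100 is exact there).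
def pvLoopA : Nat → List Int → Int → Int
  | 0, _, res => res
  | f + 1, old, res =>
      if old.map pvStepA = old then res else pvLoopA f (old.map pvStepA) (res + 1)

def solution (arr : List Int) : Int := pvLoopA 100 arr 0

-- ===== PORT B =====
-- Source B's halving loop 'while v > 50 and v % 2 == 0' (fuel = totality guard, exact on Dom).
def pvDown : Nat → Int → Int → Int × Int
  | 0, v, c => (v, c)
  | f + 1, v, c =>
      if v > 50 ∧ v % 2 = 0 then pvDown f (PySem.Int.floordiv v 2) (c + 1) else (v, c)

-- Source B's doubling loop 'while v < 50' (fuel = totality guard, exact on Pre_ ∧ Dom).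
def pvUp : Nat → Int → Int → Int
  | 0, _, c => c
  | f + 1, v, c => if v < 50 then pvUp f (2 * v + 1) (c + 1) else c

-- Source B's per-element count (the body of its for-loop).
def pvCell (x : Int) : Int :=
  if x > 50 ∧ x % 2 = 0 then
    let p := pvDown 100 x 0
    if p.1 < 50 ∧ p.1 % 2 ≠ 0 then p.2 + 1 else p.2
  else if x % 2 ≠ 0 ∧ 1 ≤ x ∧ x < 50 then pvUp 100 x 0
  else 0

def solution_alt (arr : List Int) : Int :=
  arr.foldl (fun best x => max best (pvCell x)) 0

-- ===== PRECONDITION & SPEC =====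
-- Pre_ excludes arrays containing an odd element below -1: on those the Python A
-- (and B's doubling rule) never reaches a fixed point, so A diverges and returns nothing.
def Pre_solution (arr : List Int) : Prop := ∀ x ∈ arr, ¬(x % 2 = 1 ∧ x < -1)
instance (arr : List Int) : Decidable (Pre_solution arr) := by unfold Pre_solution; infer_instance

def pvWitness_solution : List Int := [1, 100, -1, 52]

def Spec_solution (arr : List Int) (out : Int) : Prop := out = solution_alt arr
instance (arr : List Int) (out : Int) : Decidable (Spec_solution arr out) := by unfold Spec_solution; infer_instance

-- ===== CLAIM (what is proved, stated in full; the proofs are below) =====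
def Claim_equal_solution : Prop :=
  ∀ (arr : List Int), Dom_solution arr → Pre_solution arr → Spec_solution arr (solution arr)

-- ===== LEMMAS AND PROOFS =====

-- Proof-only helper: the number of steps element v needs to stabilize under A's rule
-- (fuel-guarded); A's whole-list loop is first reduced to a fold of these counts.
def pvCountB : Nat → Int → Int → Int
  | 0, _, c => c
  | f + 1, v, c => if pvStepA v = v then c else pvCountB f (pvStepA v) (c + 1)

theorem countB_nonneg (F : Nat) : ∀ (v c : Int), 0 ≤ c → 0 ≤ pvCountB F v c := by
  induction F with
  | zero => intro v c hc; simpa [pvCountB] using hc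
  | succ f ih =>
      intro v c hc
      simp only [pvCountB]
      split
      · exact hc
      · exact ih _ _ (by omega)

theorem countB_fixed (F : Nat) (v : Int) (h : pvStepA v = v) : pvCountB F v 0 = 0 := by
  cases F with
  | zero => rfl
  | succ f => simp [pvCountB, h]

theorem countB_shift (F : Nat) : ∀ (v c : Int), pvCountB F v c = c + pvCountB F v 0 := by
  induction F with
  | zero => intro v c; simp [pvCountB]
  | succ f ih =>
      intro v c
      simp only [pvCountB]
      split
      · simp
      · rw [ih (pvStepA v) (c + 1), ih (pvStepA v) (0 + 1)]; omega

theorem countB_step (F : Nat) (v : Int) (h : pvStepA v ≠ v) :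
    pvCountB (F + 1) v 0 = 1 + pvCountB F (pvStepA v) 0 := by
  simp only [pvCountB, h, if_false]
  rw [countB_shift F (pvStepA v) (0 + 1)]; omega

theorem loopA_shift (F : Nat) : ∀ (l : List Int) (res : Int), pvLoopA F l res = res + pvLoopA F l 0 := by
  induction F with
  | zero => intro l res; simp [pvLoopA]
  | succ f ih =>
      intro l res
      simp only [pvLoopA]
      split
      · simp
      · rw [ih (l.map pvStepA) (res + 1), ih (l.map pvStepA) (0 + 1)]; omega

theorem foldMax_ge_init (f : Int → Int) : ∀ (l : List Int) (a : Int),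
    a ≤ l.foldl (fun m x => max m (f x)) a := by
  intro l
  induction l with
  | nil => intro a; simp
  | cons x xs ih =>
      intro a
      simp only [List.foldl_cons]
      exact le_trans (le_max_left a (f x)) (ih _)

theorem foldMax_ge_mem (f : Int → Int) : ∀ (l : List Int) (i : Int), i ∈ l → ∀ a : Int,
    f i ≤ l.foldl (fun m x => max m (f x)) a := by
  intro l
  induction l with
  | nil => intro i hi; cases hi
  | cons x xs ih =>
      intro i hi a
      simp only [List.foldl_cons]
      rcases List.mem_cons.mp hi with h | h
      · subst h; exact le_trans (le_max_right a (f i)) (foldMax_ge_init f xs _)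
      · exact ih i h _

theorem foldMax_zero (f : Int → Int) : ∀ (l : List Int), (∀ i ∈ l, f i = 0) →
    l.foldl (fun m x => max m (f x)) 0 = 0 := by
  intro l
  induction l with
  | nil => intro _; rfl
  | cons x xs ih =>
      intro h
      simp only [List.foldl_cons, h x (List.mem_cons_self)]
      simpa using ih (fun i hi => h i (List.mem_cons_of_mem _ hi))

theorem foldMax_congr (f g : Int → Int) : ∀ (l : List Int), (∀ i ∈ l, f i = g i) → ∀ a : Int,
    l.foldl (fun m x => max m (f x)) a = l.foldl (fun m x => max m (g x)) a := by
  intro l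
  induction l with
  | nil => intro _ a; rfl
  | cons x xs ih =>
      intro h a
      simp only [List.foldl_cons, h x (List.mem_cons_self)]
      exact ih (fun i hi => h i (List.mem_cons_of_mem _ hi)) _

theorem map_id_of_forall (f : Int → Int) : ∀ (l : List Int), (∀ i ∈ l, f i = i) → l.map f = l := by
  intro l
  induction l with
  | nil => intro _; rfl
  | cons x xs ih =>
      intro h
      simp only [List.map_cons, h x (List.mem_cons_self)]
      rw [ih (fun i hi => h i (List.mem_cons_of_mem _ hi))]

-- Key step: advancing A's round by one matches advancing every element's counter by one,
-- under the accumulator invariant  max 1 b = 1 + a.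
theorem pvKey (F : Nat) : ∀ (l : List Int) (a b : Int), 0 ≤ a → 0 ≤ b → max 1 b = 1 + a →
    max 1 (l.foldl (fun m x => max m (pvCountB (F + 1) x 0)) b)
      = 1 + l.foldl (fun m x => max m (pvCountB F (pvStepA x) 0)) a := by
  intro l
  induction l with
  | nil => intro a b _ _ h; simpa using h
  | cons x xs ih =>
      intro a b ha hb h
      simp only [List.foldl_cons]
      apply ih
      · exact le_trans ha (le_max_left _ _)
      · exact le_trans hb (le_max_left _ _)
      · by_cases hx : pvStepA x = x
        · have h1 : pvCountB (F + 1) x 0 = 0 := countB_fixed _ _ hx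
          have h2 : pvCountB F (pvStepA x) 0 = 0 := by rw [hx]; exact countB_fixed _ _ hx
          rw [h1, h2]; omega
        · have h1 := countB_step F x hx
          have h2 : 0 ≤ pvCountB F (pvStepA x) 0 := countB_nonneg F _ 0 le_rfl
          rw [h1]; omega

theorem pvMain (F : Nat) : ∀ (l : List Int),
    pvLoopA F l 0 = l.foldl (fun m x => max m (pvCountB F x 0)) 0 := by
  induction F with
  | zero =>
      intro l
      exact (foldMax_zero (fun x => pvCountB 0 x 0) l (fun i _ => rfl)).symm
  | succ f ih =>
      intro l
      by_cases hfix : l.map pvStepA = l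
      · have hall : ∀ i ∈ l, pvStepA i = i := by
          intro i hi
          induction l with
          | nil => cases hi
          | cons x xs ihx =>
              simp only [List.map_cons, List.cons.injEq] at hfix
              rcases List.mem_cons.mp hi with h' | h'
              · subst h'; exact hfix.1
              · exact ihx hfix.2 h'
        have hz : pvLoopA (f + 1) l 0 = 0 := by simp [pvLoopA, hfix]
        rw [hz]
        exact (foldMax_zero (fun x => pvCountB (f + 1) x 0) l (fun i hi =>
          countB_fixed (f + 1) i (hall i hi))).symm
      · have h1 : pvLoopA (f + 1) l 0 = 1 + pvLoopA f (l.map pvStepA) 0 := by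
          simp only [pvLoopA, hfix, if_false]
          rw [loopA_shift f (l.map pvStepA) (0 + 1)]; omega
        rw [h1, ih, List.foldl_map,
          ← pvKey f l 0 0 le_rfl le_rfl (by omega)]
        have hex : ∃ i ∈ l, pvStepA i ≠ i := by
          by_contra hc
          push Not at hc
          exact hfix (map_id_of_forall pvStepA l hc)
        obtain ⟨i, hi, hne⟩ := hex
        have hcnt : 1 ≤ pvCountB (f + 1) i 0 := by
          rw [countB_step f i hne]
          have := countB_nonneg f (pvStepA i) 0 le_rfl
          omega
        have hM : (1 : Int) ≤ l.foldl (fun m x => max m (pvCountB (f + 1) x 0)) 0 :=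
          le_trans hcnt (foldMax_ge_mem _ l i hi 0)
        exact max_eq_right hM

-- shifts for B's two loops
theorem down_shift (F : Nat) : ∀ (v c : Int),
    (pvDown F v c).1 = (pvDown F v 0).1 ∧ (pvDown F v c).2 = c + (pvDown F v 0).2 := by
  induction F with
  | zero => intro v c; simp [pvDown]
  | succ f ih =>
      intro v c
      simp only [pvDown]
      split
      · obtain ⟨h1, h2⟩ := ih (PySem.Int.floordiv v 2) (c + 1)
        obtain ⟨h1', h2'⟩ := ih (PySem.Int.floordiv v 2) (0 + 1)
        exact ⟨by rw [h1, h1'], by rw [h2, h2']; omega⟩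
      · simp

theorem up_shift (F : Nat) : ∀ (v c : Int), pvUp F v c = c + pvUp F v 0 := by
  induction F with
  | zero => intro v c; simp [pvUp]
  | succ f ih =>
      intro v c
      simp only [pvUp]
      split
      · rw [ih (2 * v + 1) (c + 1), ih (2 * v + 1) (0 + 1)]; omega
      · simp

-- Up phase: for odd v ≥ 1, A's per-element count equals B's doubling loop (any fuel).
theorem pvUpEq (F : Nat) : ∀ (v : Int), v % 2 = 1 → 1 ≤ v → pvCountB F v 0 = pvUp F v 0 := by
  induction F with
  | zero => intro v _ _; rfl
  | succ f ih =>
      intro v hodd hpos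
      by_cases hlt : v < 50
      · have hs : pvStepA v = 2 * v + 1 := by
          simp only [pvStepA]
          rw [if_neg (by omega), if_pos (by omega)]
        have hne : pvStepA v ≠ v := by rw [hs]; omega
        rw [countB_step f v hne, hs, ih (2 * v + 1) (by omega) (by omega)]
        simp only [pvUp, if_pos hlt]
        rw [up_shift f (2 * v + 1) (0 + 1)]; omega
      · have hs : pvStepA v = v := by
          simp only [pvStepA]
          rw [if_neg (by omega), if_neg (by omega)]
        rw [countB_fixed _ _ hs]
        simp only [pvUp]
        rw [if_neg (by omega)]

-- Down phase: for v ≥ 26 with v < 2^F, A's per-element count equals B's halving loop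
-- plus the +1 correction when the loop ends on an odd value below 50.
theorem pvDownEq (F : Nat) : ∀ (v : Int), 26 ≤ v → v < 2 ^ F →
    pvCountB F v 0 =
      (if (pvDown F v 0).1 < 50 ∧ (pvDown F v 0).1 % 2 ≠ 0 then (pvDown F v 0).2 + 1
       else (pvDown F v 0).2) := by
  induction F with
  | zero => intro v h1 h2; omega
  | succ f ih =>
      intro v h26 hlt
      have hmod : v % 2 = 0 ∨ v % 2 = 1 := by omega
      by_cases hdn : v > 50 ∧ v % 2 = 0
      · -- one halving step
        have hfd : PySem.Int.floordiv v 2 = v / 2 :=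
          PySem.Int.floordiv_eq_ediv_of_pos (by omega)
        have hs : pvStepA v = v / 2 := by
          simp only [pvStepA]; rw [if_pos hdn, hfd]
        have hne : pvStepA v ≠ v := by rw [hs]; omega
        rw [countB_step f v hne, hs]
        have hd : pvDown (f + 1) v 0 = pvDown f (PySem.Int.floordiv v 2) 1 := by
          simp only [pvDown, if_pos hdn]
          norm_num
        have hpow : v / 2 < 2 ^ f := by
          have : (2:Int) ^ (f + 1) = 2 * 2 ^ f := by ring
          omega
        rw [ih (v / 2) (by omega) hpow, hd, hfd]
        obtain ⟨e1, e2⟩ := down_shift f (v / 2) 1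
        rw [e1, e2]
        split <;> omega
      · -- loop does not run: pvDown gives (v, 0)
        have hd : pvDown (f + 1) v 0 = (v, 0) := by simp only [pvDown, if_neg hdn]
        rw [hd]
        by_cases hup : v % 2 = 1 ∧ v < 50
        · -- one doubling step lands on an odd fixed point > 50
          have hs : pvStepA v = 2 * v + 1 := by
            simp only [pvStepA]
            rw [if_neg (by omega), if_pos (by omega)]
          have hne : pvStepA v ≠ v := by rw [hs]; omega
          have hfix2 : pvStepA (2 * v + 1) = 2 * v + 1 := by
            simp only [pvStepA]
            rw [if_neg (by omega), if_neg (by omega)]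
          rw [countB_step f v hne, hs, countB_fixed _ _ hfix2]
          rw [if_pos (by constructor <;> omega)]
          norm_num
        · -- already fixed
          have hs : pvStepA v = v := by
            simp only [pvStepA]
            rw [if_neg hdn, if_neg (by omega)]
          rw [countB_fixed _ _ hs, if_neg (by omega)]

-- Per-element agreement on Dom ∧ Pre.
theorem pvCellEq (x : Int) (hd : -2147483648 ≤ x ∧ x ≤ 2147483648)
    (hp : ¬(x % 2 = 1 ∧ x < -1)) : pvCountB 100 x 0 = pvCell x := by
  have hmod : x % 2 = 0 ∨ x % 2 = 1 := by omega
  by_cases h1 : x > 50 ∧ x % 2 = 0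
  · have hpow : x < 2 ^ (100 : Nat) := by
      have : (2147483648 : Int) < 2 ^ (100 : Nat) := by norm_num
      omega
    rw [pvDownEq 100 x (by omega) hpow]
    simp only [pvCell, if_pos h1]
  · by_cases h2 : x % 2 ≠ 0 ∧ 1 ≤ x ∧ x < 50
    · rw [pvUpEq 100 x (by omega) h2.2.1]
      simp only [pvCell, if_neg h1, if_pos h2]
    · have hs : pvStepA x = x := by
        simp only [pvStepA]
        rw [if_neg h1]
        split
        · omega
        · rfl
      rw [countB_fixed _ _ hs]
      simp only [pvCell, if_neg h1, if_neg h2]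

-- ===== VERDICT (by name: the statement is the Claim_ definition above) =====
theorem solution_spec : Claim_equal_solution := by
  intro arr hdom hpre
  unfold Spec_solution solution solution_alt
  rw [pvMain 100 arr]
  apply foldMax_congr
  intro i hi
  have hd : pvDomInt i = true := by
    have := (List.all_eq_true.mp hdom) i hi
    simpa using this
  have hd' : -2147483648 ≤ i ∧ i ≤ 2147483648 := by
    simpa [pvDomInt] using hd
  exact pvCellEq i hd' (hpre i hi)
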